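-- pv_equiv track=rewrite | github.com/TotonhoMilk/Estudo-em-Python | 042-count_longest_word.py | largest_word
-- ===== SOURCE A (Python) =====
-- def largest_word(s):
--     n = len(s)
--     i = 0
--     length = 0
--     max = 0
--     while i < n:
--         if s[i] not in " .,:!?\n\t":
--             length += 1
--         else:
--             if length > max:
--                 max = length
--             length = 0
--         i += 1
--     if length > max:
--         max = length
--     return max
-- ===== SOURCE B (Python) =====
-- def largest_word(s):
--     parts = "".join(" " if c in " .,:!?\n\t" else c for c in s).split(" ")
--     return max(len(w) for w in parts)
-- ===== Notes on version B (the rewrite author's own statement) =====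
-- stated objective: idiomatic
-- what changed: B normalizes every delimiter to a space, splits the string into tokens, and takes the maximum token length, instead of A's character-by-character run counter with a running maximum.
import Mathlib
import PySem

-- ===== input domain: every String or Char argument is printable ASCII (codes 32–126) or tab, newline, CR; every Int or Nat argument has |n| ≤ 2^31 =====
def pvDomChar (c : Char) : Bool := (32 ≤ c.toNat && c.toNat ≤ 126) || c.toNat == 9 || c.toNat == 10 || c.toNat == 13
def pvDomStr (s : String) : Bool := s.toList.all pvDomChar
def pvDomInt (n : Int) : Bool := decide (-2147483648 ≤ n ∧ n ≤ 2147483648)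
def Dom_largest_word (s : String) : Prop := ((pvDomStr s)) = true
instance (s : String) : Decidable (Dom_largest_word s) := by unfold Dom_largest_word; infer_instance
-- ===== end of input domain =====

-- B replaces A's incremental run counter by: normalize delimiters to spaces, split into tokens, take the max token length (idiomatic build-tokens-then-reduce; same cost).


-- the eight delimiter characters " .,:!?\n\t"
def pvDelims : List Char := [' ', '.', ',', ':', '!', '?', '\n', '\t']

-- ===== PORT A =====
-- the loop body: `if s[i] not in delims: length += 1 else: update max, reset length`
def pvStepA (st : Int × Int) (c : Char) : Int × Int :=
  if pvDelims.contains c = false then (st.1 + 1, st.2)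
  else (0, if st.1 > st.2 then st.1 else st.2)

-- the trailing `if length > max: max = length; return max`
def pvEndA (st : Int × Int) : Int := if st.1 > st.2 then st.1 else st.2

-- A's while loop over s[i] with state (length, max); branches in source order.
def largest_word (s : String) : Int :=
  pvEndA (s.toList.foldl pvStepA (0, 0))

-- ===== PORT B =====
-- `" " if c in " .,:!?\n\t" else c`
def pvNorm (c : Char) : Char := if pvDelims.contains c then ' ' else c

-- split-on-a-single-space, keeping empty tokens (Python's s.split(" "))
def pvSplitSp (cs : List Char) : List (List Char) :=
  match cs with
  | [] => [[]]
  | c :: rest =>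
    if c = ' ' then [] :: pvSplitSp rest
    else
      match pvSplitSp rest with
      | [] => [[c]]
      | t :: ts => (c :: t) :: ts

-- max(len(w) for w in parts); parts is always nonempty so the [] branch never fires
def largest_word_alt (s : String) : Int :=
  let parts := pvSplitSp (s.toList.map pvNorm)
  match parts.map (fun t => (t.length : Int)) with
  | [] => 0
  | x :: xs => xs.foldl max x

-- ===== PRECONDITION & SPEC =====
def Spec_largest_word (s : String) (out : Int) : Prop := out = largest_word_alt s
instance (s : String) (out : Int) : Decidable (Spec_largest_word s out) := by unfold Spec_largest_word; infer_instance

-- ===== CLAIM (what is proved, stated in full; the proofs are below) =====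
def Claim_equal_largest_word : Prop := ∀ (s : String), Dom_largest_word s → Spec_largest_word s (largest_word s)

-- ===== LEMMAS AND PROOFS =====

-- max of token lengths with the first token length boosted by `len`
def pvSplitMax (len : Int) : List (List Char) → Int
  | [] => len
  | t :: ts => (ts.map (fun u => (u.length : Int))).foldl max (len + (t.length : Int))

lemma pv_ifmax (a b : Int) : (if a > b then a else b) = max a b := by
  split <;> omega

lemma pv_fold_pull (L : List Int) : ∀ x a : Int, L.foldl max (max x a) = max x (L.foldl max a) := by
  induction L with
  | nil => intro x a; simp
  | cons b L ih => intro x a; simp only [List.foldl]; rw [max_assoc, ih]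

lemma pv_le_fold (L : List Int) : ∀ a : Int, a ≤ L.foldl max a := by
  induction L with
  | nil => intro a; simp
  | cons b L ih =>
    intro a
    exact le_trans (le_max_left a b) (ih (max a b))

lemma pvSplitSp_ne_nil (cs : List Char) : pvSplitSp cs ≠ [] := by
  cases cs with
  | nil => simp [pvSplitSp]
  | cons c rest =>
    simp only [pvSplitSp]
    split
    · simp
    · split <;> simp

lemma pv_main (cs : List Char) : ∀ len m : Int,
    pvEndA (cs.foldl pvStepA (len, m))
    = max m (pvSplitMax len (pvSplitSp (cs.map pvNorm))) := by
  induction cs with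
  | nil =>
    intro len m
    simp [pvEndA, pvSplitSp, pvSplitMax, pv_ifmax, max_comm]
  | cons c rest ih =>
    intro len m
    by_cases hc : pvDelims.contains c = true
    · -- delimiter: run resets, max updates
      have hstep : pvStepA (len, m) c = (0, max len m) := by
        unfold pvStepA; rw [hc]; simp [pv_ifmax]
      have hg : pvNorm c = ' ' := by unfold pvNorm; rw [hc]; simp
      rw [List.foldl_cons, hstep, ih 0 (max len m), List.map_cons, hg]
      rcases h : pvSplitSp (rest.map pvNorm) with _ | ⟨t, ts⟩
      · exact absurd h (pvSplitSp_ne_nil _)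
      · have : pvSplitSp (' ' :: rest.map pvNorm) = [] :: t :: ts := by
          simp [pvSplitSp, h]
        rw [this]
        simp only [pvSplitMax, List.map_cons, List.foldl_cons, List.length_nil]
        simp only [Nat.cast_zero, add_zero, zero_add]
        rw [pv_fold_pull]
        rw [max_assoc, max_left_comm]
    · have hc' : pvDelims.contains c = false := Bool.eq_false_iff.mpr hc
      have hsp : c ≠ ' ' := by intro h; subst h; exact absurd hc' (by decide)
      have hstep : pvStepA (len, m) c = (len + 1, m) := by
        unfold pvStepA; rw [hc']; simp
      have hg : pvNorm c = c := by unfold pvNorm; rw [hc']; simp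
      rw [List.foldl_cons, hstep, ih (len + 1) m, List.map_cons, hg]
      rcases h : pvSplitSp (rest.map pvNorm) with _ | ⟨t, ts⟩
      · exact absurd h (pvSplitSp_ne_nil _)
      · have : pvSplitSp (c :: rest.map pvNorm) = (c :: t) :: ts := by
          simp [pvSplitSp, h, hsp]
        rw [this]
        simp only [pvSplitMax, List.length_cons]
        congr 2
        push_cast
        ring

-- ===== VERDICT (by name: the statement is the Claim_ definition above) =====
theorem largest_word_spec : Claim_equal_largest_word := by
  intro s _
  unfold Spec_largest_word largest_word largest_word_alt
  rw [pv_main s.toList 0 0]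
  rcases hs : pvSplitSp (s.toList.map pvNorm) with _ | ⟨t, ts⟩
  · exact absurd hs (pvSplitSp_ne_nil _)
  · show max 0 (pvSplitMax 0 (t :: ts)) = (ts.map (fun u => (u.length : Int))).foldl max ((t.length : Int))
    simp only [pvSplitMax, zero_add]
    have h0 : (0:Int) ≤ (ts.map (fun u => (u.length : Int))).foldl max (t.length : Int) :=
      le_trans (by positivity) (pv_le_fold _ _)
    omega
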